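-- pv_equiv track=rewrite | github.com/hdbookie/hunterXCodingAgent | mobile_web_agent/sub_agents/prd_parser.py | extract_api_specs
-- ===== SOURCE A (Python) =====
-- def extract_api_specs(prd_content: str) -> str:
--     """Extract API specifications from PRD."""
--     lines = prd_content.split('\n')
--     in_api = False
--     api_lines = []
--
--     for line in lines:
--         if "api endpoint" in line.lower():
--             in_api = True
--         elif line.startswith('##') and in_api and "api" not in line.lower():
--             break
--         elif in_api:
--             api_lines.append(line)
--
--     return '\n'.join(api_lines)
-- ===== SOURCE B (Python) =====
-- def extract_api_specs(prd_content: str) -> str: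
--     """Extract API specs via staged passes: build index lists, slice out the
--     region between the first trigger and the first stop header, then filter."""
--     lines = prd_content.split('\n')
--     is_trigger = lambda l: "api endpoint" in l.lower()
--     trigger_idxs = [i for i, l in enumerate(lines) if is_trigger(l)]
--     if not trigger_idxs:
--         return ''
--     tail = lines[trigger_idxs[0] + 1:]
--     stop_idxs = [i for i, l in enumerate(tail)
--                  if l.startswith('##') and "api" not in l.lower()
--                  and not is_trigger(l)]
--     region = tail[:stop_idxs[0]] if stop_idxs else tail
--     return '\n'.join(l for l in region if not is_trigger(l))
-- ===== Notes on version B (the rewrite author's own statement) =====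
-- stated objective: alternative
-- what changed: Replaces A's single stateful scan (in_api flag with break/continue decisions per line) by staged passes: build the index lists of trigger lines and of stop headers with comprehensions, slice the region between the first trigger and the first stop out of the line list, and filter trigger lines from it.
import Mathlib
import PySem

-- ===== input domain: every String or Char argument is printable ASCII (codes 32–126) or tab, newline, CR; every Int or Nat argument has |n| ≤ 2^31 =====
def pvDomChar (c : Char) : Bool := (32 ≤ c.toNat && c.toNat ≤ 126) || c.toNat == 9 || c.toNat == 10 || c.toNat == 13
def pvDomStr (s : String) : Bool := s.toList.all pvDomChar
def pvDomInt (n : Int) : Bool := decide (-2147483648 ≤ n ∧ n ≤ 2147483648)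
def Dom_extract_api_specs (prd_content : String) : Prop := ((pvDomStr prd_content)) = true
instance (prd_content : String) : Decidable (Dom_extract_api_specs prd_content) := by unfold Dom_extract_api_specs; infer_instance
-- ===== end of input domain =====

-- B replaces A's single stateful scan (in_api flag with break) by staged passes:
-- build the index lists of trigger and stop lines, slice out the region between
-- them, and filter it. Alternative decomposition, same cost.

-- s.split('\n') (shared primitive; PySem.Chars.splitOn is exact for a nonempty separator)
def pySplitLines (s : String) : List String :=
  (PySem.Chars.splitOn s.toList "\n".toList).map String.ofList

-- ===== PORT A =====
-- the for-loop of A: state = in_api flag; branches in A's order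
def extract_api_specs_loop : List String → Bool → List String
  | [], _ => []
  | line :: rest, in_api =>
    if PySem.Str.isIn "api endpoint" (PySem.Str.lower line) then
      extract_api_specs_loop rest true
    else if PySem.Str.startswith line "##" && in_api
            && !(PySem.Str.isIn "api" (PySem.Str.lower line)) then
      []  -- break
    else if in_api then
      line :: extract_api_specs_loop rest in_api  -- api_lines.append(line)
    else
      extract_api_specs_loop rest in_api

def extract_api_specs (prd_content : String) : String :=
  PySem.Str.join "\n" (extract_api_specs_loop (pySplitLines prd_content) false)

-- ===== PORT B =====
-- is_trigger = lambda l: "api endpoint" in l.lower()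
def pvIsTrigger (l : String) : Bool := PySem.Str.isIn "api endpoint" (PySem.Str.lower l)

-- the stop-line test of Source B's second comprehension:
-- l.startswith('##') and "api" not in l.lower() and not is_trigger(l)
def pvIsStop (l : String) : Bool :=
  PySem.Str.startswith l "##" && !(PySem.Str.isIn "api" (PySem.Str.lower l)) && !(pvIsTrigger l)

-- trigger_idxs = [i for i, l in enumerate(lines) if is_trigger(l)]
def pvTriggerIdxs (lines : List String) : List Int :=
  ((PySem.List.enumerate lines 0).filter (fun p => pvIsTrigger p.2)).map (·.1)

-- stop_idxs = [i for i, l in enumerate(tail) if …]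
def pvStopIdxs (tail : List String) : List Int :=
  ((PySem.List.enumerate tail 0).filter (fun p => pvIsStop p.2)).map (·.1)

-- region = tail[:stop_idxs[0]] if stop_idxs else tail
def pvRegion (tail : List String) : List String :=
  match pvStopIdxs tail with
  | [] => tail
  | s :: _ => PySem.List.slice tail none (some s)

def extract_api_specs_alt (prd_content : String) : String :=
  match pvTriggerIdxs (pySplitLines prd_content) with
  | [] => ""                    -- if not trigger_idxs: return ''
  | t :: _ =>                   -- tail = lines[trigger_idxs[0]+1:]; '\n'.join(l for l in region if not is_trigger(l))
      PySem.Str.join "\n"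
        ((pvRegion (PySem.List.slice (pySplitLines prd_content) (some (t + 1)) none)).filter
          (fun l => !(pvIsTrigger l)))

-- ===== PRECONDITION & SPEC =====
def Spec_extract_api_specs (prd_content : String) (out : String) : Prop := out = extract_api_specs_alt prd_content
instance (prd_content : String) (out : String) : Decidable (Spec_extract_api_specs prd_content out) := by unfold Spec_extract_api_specs; infer_instance

-- ===== CLAIM (what is proved, stated in full; the proofs are below) =====
def Claim_equal_extract_api_specs : Prop := ∀ (prd_content : String), Dom_extract_api_specs prd_content → Spec_extract_api_specs prd_content (extract_api_specs prd_content)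

-- ===== LEMMAS AND PROOFS =====

-- A's cons-step, re-expressed with B's two predicates (pure Boolean reshuffle)
theorem loop_cons (line : String) (rest : List String) (in_api : Bool) :
    extract_api_specs_loop (line :: rest) in_api =
      (if pvIsTrigger line then extract_api_specs_loop rest true
       else if pvIsStop line && in_api then []
       else if in_api then line :: extract_api_specs_loop rest in_api
       else extract_api_specs_loop rest in_api) := by
  by_cases h1 : PySem.Str.isIn "api endpoint" (PySem.Str.lower line) = true
  · simp only [extract_api_specs_loop, pvIsTrigger, h1, if_true]
  · rw [Bool.not_eq_true] at h1
    simp only [extract_api_specs_loop, pvIsTrigger, pvIsStop, h1, Bool.false_eq_true,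
      if_false, Bool.not_false, Bool.and_true]
    cases in_api
    · simp only [Bool.and_false, Bool.false_and, Bool.false_eq_true, if_false]
    · simp only [Bool.and_true, Bool.true_and, if_true]

-- the head of a comprehension [i for i,l in enumerate(ls, s) if f l] is findIdx? shifted by s
theorem enum_filter_head (f : String → Bool) (ls : List String) (s : Int) :
    ((((PySem.List.enumerate ls s).filter (fun p => f p.2)).map (·.1))).head?
      = (List.findIdx? f ls).map (fun (k : Nat) => s + (k : Int)) := by
  induction ls generalizing s with
  | nil => simp [PySem.List.enumerate_nil]
  | cons line rest ih =>
    by_cases h : f line = true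
    · simp [PySem.List.enumerate_cons, h, List.findIdx?_cons]
    · simp only [PySem.List.enumerate_cons, List.filter_cons, h, Bool.false_eq_true,
        if_false, List.findIdx?_cons, ih, Option.map_map]
      cases List.findIdx? f rest
      · simp
      · simp; ring

theorem enum_filter_head0 (f : String → Bool) (ls : List String) :
    ((((PySem.List.enumerate ls 0).filter (fun p => f p.2)).map (·.1))).head?
      = (List.findIdx? f ls).map (fun (k : Nat) => (k : Int)) := by
  have h := enum_filter_head f ls 0
  simp only [zero_add] at h
  exact h

-- A's loop once in_api holds: take up to the first stop line, drop trigger lines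
theorem loop_true_eq (ls : List String) :
    extract_api_specs_loop ls true
      = (match List.findIdx? pvIsStop ls with
         | none => ls
         | some s => ls.take s).filter (fun l => !(pvIsTrigger l)) := by
  induction ls with
  | nil => simp [extract_api_specs_loop]
  | cons line rest ih =>
    rw [loop_cons]
    by_cases h1 : pvIsTrigger line = true
    · have hns : pvIsStop line = false := by simp [pvIsStop, h1]
      simp only [h1, if_true, List.findIdx?_cons, hns, Bool.false_eq_true, if_false, ih]
      cases List.findIdx? pvIsStop rest <;> simp [List.filter_cons, h1]
    · rw [Bool.not_eq_true] at h1
      by_cases h2 : pvIsStop line = true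
      · simp only [h1, Bool.false_eq_true, if_false, h2, Bool.true_and, if_true,
          List.findIdx?_cons, List.take_zero, List.filter_nil]
      · rw [Bool.not_eq_true] at h2
        simp only [h1, Bool.false_eq_true, if_false, h2, Bool.false_and, if_true,
          List.findIdx?_cons, ih]
        cases List.findIdx? pvIsStop rest <;>
          simp [List.filter_cons, h1, List.take_succ_cons]

-- A's loop from in_api = false: find the first trigger line, then run the true-phase after it
theorem loop_false_eq (ls : List String) :
    extract_api_specs_loop ls false
      = (match List.findIdx? pvIsTrigger ls with
         | none => []
         | some k => extract_api_specs_loop (ls.drop (k + 1)) true) := by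
  induction ls with
  | nil => simp [extract_api_specs_loop]
  | cons line rest ih =>
    rw [loop_cons]
    by_cases h1 : pvIsTrigger line = true
    · simp [h1, List.findIdx?_cons]
    · rw [Bool.not_eq_true] at h1
      simp only [h1, Bool.false_eq_true, if_false, Bool.and_false,
        List.findIdx?_cons, ih]
      cases List.findIdx? pvIsTrigger rest <;> simp

-- ===== VERDICT (by name: the statement is the Claim_ definition above) =====
theorem extract_api_specs_spec : Claim_equal_extract_api_specs := by
  intro prd _
  unfold Spec_extract_api_specs extract_api_specs extract_api_specs_alt
  rw [loop_false_eq]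
  have htrig := enum_filter_head0 pvIsTrigger (pySplitLines prd)
  rw [show (((PySem.List.enumerate (pySplitLines prd) 0).filter
      (fun p => pvIsTrigger p.2)).map (·.1)) = pvTriggerIdxs (pySplitLines prd) from rfl] at htrig
  cases hk : List.findIdx? pvIsTrigger (pySplitLines prd) with
  | none =>
    rw [hk, Option.map_none, List.head?_eq_none_iff] at htrig
    simp only [htrig]
    decide
  | some k =>
    rw [hk, Option.map_some] at htrig
    obtain ⟨tl, htl⟩ := List.head?_eq_some_iff.mp htrig
    simp only [htl]
    have hdrop : PySem.List.slice (pySplitLines prd) (some ((k : Int) + 1)) none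
        = (pySplitLines prd).drop (k + 1) := by
      rw [show ((k : Int) + 1) = ((k + 1 : Nat) : Int) by push_cast; ring,
        PySem.List.slice_from_natCast]
    rw [hdrop, loop_true_eq]
    set tail := (pySplitLines prd).drop (k + 1) with ht
    have hstop := enum_filter_head0 pvIsStop tail
    rw [show (((PySem.List.enumerate tail 0).filter
        (fun p => pvIsStop p.2)).map (·.1)) = pvStopIdxs tail from rfl] at hstop
    unfold pvRegion
    cases hs : List.findIdx? pvIsStop tail with
    | none =>
      rw [hs, Option.map_none, List.head?_eq_none_iff] at hstop
      simp only [hstop]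
    | some s =>
      rw [hs, Option.map_some] at hstop
      obtain ⟨tl2, htl2⟩ := List.head?_eq_some_iff.mp hstop
      simp only [htl2]
      rw [PySem.List.slice_to_natCast]
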